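-- pv_equiv track=rewrite | github.com/Ab2nour/competitive-programming | src/todo/Anti Virus Test.py | verif_masque
-- ===== SOURCE A (Python) =====
-- def decompose_nombre(n):
--     """Décompose en nombre en un tableau qui représente ses chiffres
--     Ex : 123 devient [1, 2, 3]
--     """
--     puissance_dix = 1
--
--     while 10**puissance_dix <= n:
--         puissance_dix += 1
--
--     tab = [0 for i in range(puissance_dix)]
--
--     for i in range(1, puissance_dix + 1):
--         tab[-i] = n % 10
--         n = (n - n % 10) // 10
--
--     return tab
--
-- def verif_masque(masque, nombre):
--     n = decompose_nombre(nombre)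
--
--     if nombre == 0 or len(n) != len(masque):
--         return False
--
--     else:
--         for i in range(len(n)):
--             if masque[i] != -1:
--                 if masque[i] != n[i]:
--                     return False
--
--     return True
-- ===== SOURCE B (Python) =====
-- def verif_masque(masque, nombre):
--     n = nombre
--     for m in reversed(masque):
--         n, d = divmod(n, 10)
--         if m != -1 and m != d:
--             return False
--     return n == 0 and nombre != 0 and nombre >= 10 ** (len(masque) - 1)
-- ===== Notes on version B (the rewrite author's own statement) =====
-- stated objective: alternative
-- what changed: B never materialises a digit list: it walks the mask from the right, peeling one digit of nombre per mask entry with divmod, and replaces A's power-of-ten counting loop plus length comparison by the closed-form magnitude check n == 0 and 10**(len(masque)-1) <= nombre at the end.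
-- intended difference: On negative nombre with a single-entry mask equal to -1 or to nombre's Python floor-mod last digit (e.g. ([3], -7)), A returns True because decompose_nombre treats any negative number as the one-digit list [nombre % 10], while B returns False, the intended answer since a negative number has no digit representation matching a mask. — e.g. on verif_masque([3], -7): A returns true, B returns false
import Mathlib
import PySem

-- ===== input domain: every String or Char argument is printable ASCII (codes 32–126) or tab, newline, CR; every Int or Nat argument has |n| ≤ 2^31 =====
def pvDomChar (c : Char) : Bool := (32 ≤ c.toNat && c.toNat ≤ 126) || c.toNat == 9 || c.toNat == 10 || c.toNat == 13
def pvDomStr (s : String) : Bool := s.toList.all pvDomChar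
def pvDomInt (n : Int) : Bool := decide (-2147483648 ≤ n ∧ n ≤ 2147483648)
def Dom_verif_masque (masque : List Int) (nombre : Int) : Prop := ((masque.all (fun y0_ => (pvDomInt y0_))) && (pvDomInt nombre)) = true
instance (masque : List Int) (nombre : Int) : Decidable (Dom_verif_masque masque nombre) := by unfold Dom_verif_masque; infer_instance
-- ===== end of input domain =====

-- B never builds a digit list: it peels one digit of nombre per mask entry in a single reverse
-- pass (divmod) and checks the length by the closed-form bound 10^(len-1) <= nombre < 10^len;
-- on negative nombre with a matching single-entry mask A returns True by a floor-mod accident,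
-- B returns the intended False (see D_ below).


-- ===== PORT A =====
-- `while 10**puissance_dix <= n: puissance_dix += 1`; the extra fuel argument only makes the
-- while loop total (n.toNat + 1 iterations always suffice, proved in countPowA_len)
def countPowA (n : Int) : Nat → Nat → Nat
  | 0, p => p
  | fuel + 1, p => if (10:Int) ^ p ≤ n then countPowA n fuel (p + 1) else p

-- literal port of decompose_nombre; tab[-i] is index len(tab) - i (always in range: 1 ≤ i ≤ len(tab))
def decompose_nombre (n : Int) : List Int :=
  let puissance_dix := countPowA n (n.toNat + 1) 1
  let tab : List Int := List.replicate puissance_dix 0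
  (((PySem.List.pyRange 1 ((puissance_dix : Int) + 1) 1).foldl
      (fun (st : List Int × Int) i =>
        (st.1.set (st.1.length - i.toNat) (PySem.Int.mod st.2 10),
         PySem.Int.floordiv (st.2 - PySem.Int.mod st.2 10) 10))
      (tab, n))).1

-- the `for i in range(len(n))` loop with its early `return False`; masque[i] and n[i] are
-- in range (the loop only runs when i < len(n) = len(masque))
def checkA (masque n : List Int) : List Nat → Bool
  | [] => true
  | i :: rest =>
    if masque.getD i 0 ≠ -1 then
      if masque.getD i 0 ≠ n.getD i 0 then false else checkA masque n rest
    else checkA masque n rest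

def verif_masque (masque : List Int) (nombre : Int) : Bool :=
  let n := decompose_nombre nombre
  if nombre == 0 || n.length != masque.length then false
  else checkA masque n (List.range n.length)

-- ===== PORT B =====
-- `for m in reversed(masque): n, d = divmod(n, 10); if m != -1 and m != d: return False`
def loopB : List Int → Int → Option Int
  | [], n => some n
  | m :: rest, n =>
    if m != -1 && m != PySem.Int.mod n 10 then none
    else loopB rest (PySem.Int.floordiv n 10)

-- `return n == 0 and nombre != 0 and nombre >= 10 ** (len(masque) - 1)`; the power is only
-- reached (short-circuit) when the mask is non-empty, where Nat subtraction matches Python's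
def verif_masque_alt (masque : List Int) (nombre : Int) : Bool :=
  match loopB masque.reverse nombre with
  | none => false
  | some n => n == 0 && nombre != 0 && decide ((10:Int) ^ (masque.length - 1) ≤ nombre)

-- ===== PRECONDITION & SPEC =====
-- On negative nombre whose single-entry mask is -1 or equals nombre's Python floor-mod last
-- digit, A returns True (decompose_nombre treats every negative number as the one-digit list
-- [nombre % 10]) while B returns False, the intended answer: a negative number has no digit
-- representation that can match a mask.
def D_verif_masque (masque : List Int) (nombre : Int) : Prop :=
  nombre < 0 ∧ masque.length = 1 ∧
    (masque.getD 0 0 = -1 ∨ masque.getD 0 0 = PySem.Int.mod nombre 10)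
instance (masque : List Int) (nombre : Int) : Decidable (D_verif_masque masque nombre) := by unfold D_verif_masque; infer_instance
def Spec_verif_masque (masque : List Int) (nombre : Int) (out : Bool) : Prop :=
  ¬ D_verif_masque masque nombre → out = verif_masque_alt masque nombre
instance (masque : List Int) (nombre : Int) (out : Bool) : Decidable (Spec_verif_masque masque nombre out) := by unfold Spec_verif_masque; infer_instance
def pvDiffWitness_verif_masque : List Int × Int := ([3], -7)
def pvDiffWitnessOut_verif_masque : Bool × Bool := (true, false)

-- ===== CLAIM (what is proved, stated in full; the proofs are below) =====
def Claim_unchanged_verif_masque : Prop := ∀ (masque : List Int) (nombre : Int), Dom_verif_masque masque nombre → Spec_verif_masque masque nombre (verif_masque masque nombre)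
def Claim_changed_verif_masque : Prop := Dom_verif_masque (pvDiffWitness_verif_masque.1) (pvDiffWitness_verif_masque.2) ∧ D_verif_masque (pvDiffWitness_verif_masque.1) (pvDiffWitness_verif_masque.2) ∧ verif_masque (pvDiffWitness_verif_masque.1) (pvDiffWitness_verif_masque.2) = pvDiffWitnessOut_verif_masque.1 ∧ verif_masque_alt (pvDiffWitness_verif_masque.1) (pvDiffWitness_verif_masque.2) = pvDiffWitnessOut_verif_masque.2 ∧ pvDiffWitnessOut_verif_masque.1 ≠ pvDiffWitnessOut_verif_masque.2
def Claim_exact_verif_masque : Prop := ∀ (masque : List Int) (nombre : Int), Dom_verif_masque masque nombre → D_verif_masque masque nombre → verif_masque masque nombre ≠ verif_masque_alt masque nombre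

-- ===== LEMMAS AND PROOFS =====

-- A's digit count is the length of the digit list
theorem countPowA_len (m : Nat) (hm : 0 < m) :
    countPowA (m : Int) (((m : Int)).toNat + 1) 1 = (Nat.digits 10 m).length := by
  set L := (Nat.digits 10 m).length with hL
  have hL1 : 1 ≤ L := by
    have := Nat.length_digits 10 m (by norm_num) (by omega); omega
  have hup : m < 10 ^ L := Nat.lt_base_pow_length_digits (by norm_num)
  have hlow : ∀ p, p < L → 10 ^ p ≤ m := by
    intro p hp
    have h := Nat.base_pow_length_digits_le 10 m (by norm_num) (by omega)
    rw [← hL] at h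
    have h2 : 10 ^ (p + 1) ≤ 10 ^ L := Nat.pow_le_pow_right (by norm_num) (by omega)
    have h3 : (10:Nat) ^ (p+1) = 10 ^ p * 10 := pow_succ 10 p
    omega
  have hstop : ¬ ((10:Int) ^ L ≤ (m : Int)) := by
    simp only [not_le]
    exact_mod_cast hup
  have aux : ∀ k fuel p, 1 ≤ p → p + k = L → k ≤ fuel → countPowA (m : Int) fuel p = L := by
    intro k
    induction k with
    | zero =>
      intro fuel p _ hpk _
      have hp' : p = L := by omega
      subst hp'
      cases fuel with
      | zero => rfl
      | succ f => rw [countPowA]; simp [hstop]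
    | succ k ih =>
      intro fuel p hp1 hpk hk
      cases fuel with
      | zero => omega
      | succ f =>
        rw [countPowA]
        have : (10:Int) ^ p ≤ (m : Int) := by exact_mod_cast hlow p (by omega)
        simp only [this, if_true]
        exact ih f (p+1) (by omega) (by omega) (by omega)
  have hLm : L ≤ m + 1 := by
    rw [hL, Nat.length_digits 10 m (by norm_num) (by omega)]
    have := Nat.log_le_self 10 m
    omega
  have htn : ((m : Int)).toNat = m := Int.toNat_natCast m
  rw [htn]
  exact aux (L - 1) (m + 1) 1 (by omega) (by omega) (by omega)

theorem drop_set_cons (tab : List Int) (c : Nat) (d : Int) (h : c < tab.length) :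
    (tab.set c d).drop c = d :: tab.drop (c+1) := by
  rw [List.drop_eq_getElem_cons (by simpa using h)]
  simp [List.drop_set]

-- the back-filling loop, characterised
theorem fill_spec (p : Nat) : ∀ (c : Nat) (tab : List Int) (m : Nat), tab.length = p → c ≤ p →
    (((PySem.List.pyRange ((p : Int) + 1 - (c : Int)) ((p : Int) + 1) 1).foldl
      (fun (st : List Int × Int) i =>
        (st.1.set (st.1.length - i.toNat) (PySem.Int.mod st.2 10),
         PySem.Int.floordiv (st.2 - PySem.Int.mod st.2 10) 10))
      (tab, (m : Int)))).1
    = (List.range c).map (fun k => ((m / 10 ^ (c - 1 - k) % 10 : Nat) : Int)) ++ tab.drop c := by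
  intro c
  induction c with
  | zero =>
    intro tab m hlen _
    simp [PySem.List.pyRange]
  | succ c ih =>
    intro tab m hlen hc
    have hcons : PySem.List.pyRange ((p : Int) + 1 - ((c:Int) + 1)) ((p : Int) + 1) 1
        = ((p : Int) - c) :: PySem.List.pyRange ((p : Int) + 1 - (c : Int)) ((p : Int) + 1) 1 := by
      have := PySem.List.pyRange_one_cons (a := (p : Int) - c) (b := (p : Int) + 1) (by omega)
      rw [show (p : Int) + 1 - ((c:Int) + 1) = (p : Int) - c by ring, this]
      ring_nf
    rw [Nat.cast_add, Nat.cast_one, hcons, List.foldl_cons]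
    dsimp only
    have htoNat : ((p : Int) - c).toNat = p - c := by omega
    have hidx : tab.length - ((p : Int) - c).toNat = c := by omega
    have hmod : PySem.Int.mod (m : Int) 10 = ((m % 10 : Nat) : Int) := by
      exact_mod_cast PySem.Int.mod_natCast m 10
    have hdiv : PySem.Int.floordiv ((m : Int) - PySem.Int.mod (m : Int) 10) 10
        = ((m / 10 : Nat) : Int) := by
      rw [hmod]
      have h1 : (m : Int) - ((m % 10 : Nat) : Int) = ((m - m % 10 : Nat) : Int) := by
        have := Nat.mod_le m 10; push_cast [this]; ring
      rw [h1]
      have h2 : (m - m % 10) / 10 = m / 10 := by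
        conv_lhs => rw [show m - m % 10 = 10 * (m / 10) by omega]
        omega
      calc PySem.Int.floordiv ((m - m % 10 : Nat) : Int) 10
          = (((m - m % 10) / 10 : Nat) : Int) := by exact_mod_cast PySem.Int.floordiv_natCast _ 10
        _ = ((m / 10 : Nat) : Int) := by rw [h2]
    rw [hidx, hmod] at *
    rw [hdiv]
    rw [ih (tab.set c ((m % 10 : Nat) : Int)) (m / 10) (by simpa using hlen) (by omega)]
    rw [drop_set_cons tab c _ (by omega)]
    rw [List.range_succ, List.map_append]
    rw [List.append_assoc]
    congr 1
    · refine List.map_congr_left ?_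
      intro k hk
      have hk' : k < c := List.mem_range.mp hk
      have : 10 * 10 ^ (c - 1 - k) = 10 ^ (c + 1 - 1 - k) := by
        rw [← pow_succ']
        congr 1
        omega
      rw [Nat.div_div_eq_div_mul, this]
    · simp

theorem decompose_eq (m : Nat) (hm : 0 < m) :
    decompose_nombre (m : Int)
    = (List.range (Nat.digits 10 m).length).map
        (fun k => ((m / 10 ^ ((Nat.digits 10 m).length - 1 - k) % 10 : Nat) : Int)) := by
  have hp := countPowA_len m hm
  have hf := fill_spec (Nat.digits 10 m).length (Nat.digits 10 m).length
      (List.replicate (Nat.digits 10 m).length 0) m (by simp) le_rfl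
  rw [show ((Nat.digits 10 m).length : Int) + 1 - ((Nat.digits 10 m).length : Int) = 1 by ring] at hf
  simp only [decompose_nombre, hp]
  rw [hf]
  simp

-- A's early-return index loop is an `all` over the same indices
theorem checkA_eq_all (masque n : List Int) : ∀ (l : List Nat),
    checkA masque n l = l.all (fun i => (masque.getD i 0 == -1) || (masque.getD i 0 == n.getD i 0)) := by
  intro l
  induction l with
  | nil => rfl
  | cons i rest ih =>
    rw [checkA, List.all_cons, ih]
    simp only [List.getD]
    by_cases h1 : masque[i]?.getD 0 = -1
    · rw [if_neg (by simp [h1]), show (masque[i]?.getD 0 == -1) = true by simp [h1]]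
      simp
    · rw [if_pos h1, show (masque[i]?.getD 0 == -1) = false by simp [h1]]
      by_cases h2 : masque[i]?.getD 0 = n[i]?.getD 0
      · rw [if_neg (by simp [h2]), show (masque[i]?.getD 0 == n[i]?.getD 0) = true by simp [h2]]
        simp
      · rw [if_pos h2, show (masque[i]?.getD 0 == n[i]?.getD 0) = false by simp [h2]]
        simp

-- B's reverse loop, characterised on non-negative input: the guard tests digit i of n against
-- mask entry i (least significant first), and the surviving quotient is n / 10^len
theorem loopB_nat (ms : List Int) : ∀ (n : Nat),
    loopB ms (n : Int)
    = if ((List.range ms.length).all fun i =>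
            (ms.getD i 0 == -1) || (ms.getD i 0 == ((n / 10 ^ i % 10 : Nat) : Int)))
      then some ((n / 10 ^ ms.length : Nat) : Int) else none := by
  induction ms with
  | nil => intro n; simp [loopB]
  | cons m rest ih =>
    intro n
    rw [loopB]
    have hmod : PySem.Int.mod (n : Int) 10 = ((n % 10 : Nat) : Int) := by
      exact_mod_cast PySem.Int.mod_natCast n 10
    have hdiv : PySem.Int.floordiv (n : Int) 10 = ((n / 10 : Nat) : Int) := by
      exact_mod_cast PySem.Int.floordiv_natCast n 10
    have hshift : ∀ i : Nat, n / 10 / 10 ^ i = n / 10 ^ (i + 1) := by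
      intro i
      rw [Nat.div_div_eq_div_mul, ← pow_succ']
    have hrange : ((List.range (rest.length + 1)).all fun i =>
          ((m :: rest).getD i 0 == -1) || ((m :: rest).getD i 0 == ((n / 10 ^ i % 10 : Nat) : Int)))
        = (((m == -1) || (m == ((n % 10 : Nat) : Int))) &&
           ((List.range rest.length).all fun i =>
             (rest.getD i 0 == -1) || (rest.getD i 0 == ((n / 10 / 10 ^ i % 10 : Nat) : Int)))) := by
      rw [List.range_succ_eq_map, List.all_cons, List.all_map]
      refine congrArg₂ _ (by norm_num) ?_
      refine congrArg _ (funext fun i => ?_)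
      simp only [Function.comp_apply, List.getD_cons_succ]
      rw [hshift i]
    rw [hmod, hdiv, ih (n / 10), List.length_cons, hrange, hshift rest.length]
    have hguard : (m != -1 && m != ((n % 10 : Nat) : Int))
        = !((m == -1) || (m == ((n % 10 : Nat) : Int))) := by
      rw [Bool.not_or]; rfl
    rw [hguard]
    by_cases h1 : ((m == -1) || (m == ((n % 10 : Nat) : Int))) = true
    · rw [h1]
      simp only [Bool.not_true, Bool.true_and, Bool.false_eq_true, if_false]
    · have h1f : ((m == -1) || (m == ((n % 10 : Nat) : Int))) = false := by
        revert h1; cases (m == -1) || (m == ((n % 10 : Nat) : Int)) <;> simp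
      rw [h1f]
      simp only [Bool.not_false, Bool.false_and, Bool.false_eq_true, if_false, if_true]

-- any value B's loop returns on negative input is negative
theorem loopB_neg : ∀ (ms : List Int) (x : Int), x < 0 → ∀ v, loopB ms x = some v → v < 0 := by
  intro ms
  induction ms with
  | nil => intro x hx v hv; rw [loopB] at hv; injection hv with h; omega
  | cons m rest ih =>
    intro x hx v hv
    rw [loopB] at hv
    by_cases hg : (m != -1 && m != PySem.Int.mod x 10) = true
    · rw [if_pos hg] at hv; cases hv
    · rw [if_neg hg] at hv
      have hq : PySem.Int.floordiv x 10 < 0 := by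
        rw [PySem.Int.floordiv_lt_iff_lt_mul (by norm_num)]
        omega
      exact ih _ hq v hv

-- B is false on every negative input
theorem altB_neg (masque : List Int) (x : Int) (hx : x < 0) :
    verif_masque_alt masque x = false := by
  unfold verif_masque_alt
  cases hv : loopB masque.reverse x with
  | none => rfl
  | some v =>
    have := loopB_neg masque.reverse x hx v hv
    have h0 : (v == (0:Int)) = false := by simp; omega
    simp [h0]

-- B is false on zero
theorem altB_zero (masque : List Int) : verif_masque_alt masque 0 = false := by
  unfold verif_masque_alt
  have h := loopB_nat masque.reverse 0
  norm_num at h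
  rw [h]
  split_ifs with hc
  · simp
  · rfl

-- A on a negative number: decompose_nombre returns the single Python floor-mod digit
theorem decompose_neg (x : Int) (hx : x < 0) :
    decompose_nombre x = [PySem.Int.mod x 10] := by
  have hc : countPowA x (x.toNat + 1) 1 = 1 := by
    rw [show x.toNat = 0 by omega]
    show countPowA x 1 1 = 1
    rw [countPowA, if_neg (by norm_num; omega)]
  unfold decompose_nombre
  rw [hc]
  norm_num [show PySem.List.pyRange 1 2 1 = [1] by decide]

-- reading an index of the reversed mask is reading the mirrored index of the mask
theorem getD_reverse_idx (l : List Int) (i : Nat) (hi : i < l.length) :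
    l.reverse.getD i 0 = l.getD (l.length - 1 - i) 0 := by
  rw [List.getD_eq_getElem _ _ (by simpa using hi), List.getD_eq_getElem _ _ (by omega),
    List.getElem_reverse]

-- the two ports agree on every positive number
theorem main_pos (masque : List Int) (m : Nat) (hm : 0 < m) :
    verif_masque masque (m : Int) = verif_masque_alt masque (m : Int) := by
  set L := (Nat.digits 10 m).length with hLdef
  have hL1 : 1 ≤ L := by
    have := Nat.length_digits 10 m (by norm_num) (by omega); omega
  have hup : m < 10 ^ L := Nat.lt_base_pow_length_digits (by norm_num)
  have hlow : 10 ^ (L - 1) ≤ m := by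
    have h := Nat.base_pow_length_digits_le 10 m (by norm_num) (by omega)
    rw [← hLdef] at h
    have h3 : (10:Nat) ^ L = 10 ^ (L - 1) * 10 := by
      rw [← pow_succ]; congr 1; omega
    omega
  have hAiff : verif_masque masque (m : Int) = true ↔
      (masque.length = L ∧ ∀ j, j < L →
        (masque.getD j 0 = -1 ∨ masque.getD j 0 = ((m / 10 ^ (L - 1 - j) % 10 : Nat) : Int))) := by
    simp only [verif_masque]
    rw [decompose_eq m hm, checkA_eq_all, ← hLdef]
    have h0 : ((m : Int) == 0) = false := by simp; omega
    rw [List.length_map, List.length_range, h0, Bool.false_or]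
    by_cases hK : L = masque.length
    · rw [if_neg (by simp [hK])]
      simp only [List.all_eq_true, List.mem_range]
      constructor
      · intro h
        refine ⟨hK.symm, fun j hj => ?_⟩
        have := h j (by omega)
        rwa [PySem.List.getD_map_range _ _ _ _ hj, Bool.or_eq_true, beq_iff_eq,
          beq_iff_eq] at this
      · intro ⟨_, h⟩ j hj
        rw [PySem.List.getD_map_range _ _ _ _ (by omega), Bool.or_eq_true, beq_iff_eq,
          beq_iff_eq]
        exact h j (by omega)
    · rw [if_pos (by simp; omega)]
      simp only [Bool.false_eq_true, false_iff, not_and]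
      intro h; omega
  have hBiff : verif_masque_alt masque (m : Int) = true ↔
      ((∀ i, i < masque.length →
          (masque.reverse.getD i 0 = -1 ∨ masque.reverse.getD i 0 = ((m / 10 ^ i % 10 : Nat) : Int)))
        ∧ m / 10 ^ masque.length = 0 ∧ 10 ^ (masque.length - 1) ≤ m) := by
    unfold verif_masque_alt
    rw [loopB_nat masque.reverse m, List.length_reverse]
    split_ifs with hc
    · simp only [List.all_eq_true, List.mem_range, Bool.or_eq_true, beq_iff_eq] at hc
      have hm0 : ((m : Int) != 0) = true := by simp; omega
      have hcast : ((10:Int) ^ (masque.length - 1) ≤ (m : Int)) ↔ 10 ^ (masque.length - 1) ≤ m := by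
        constructor <;> intro h <;> exact_mod_cast h
      constructor
      · intro h
        simp only [Bool.and_eq_true, beq_iff_eq, decide_eq_true_eq] at h
        exact ⟨hc, by exact_mod_cast h.1.1, hcast.mp h.2⟩
      · intro ⟨_, h2, h3⟩
        simp only [Bool.and_eq_true, beq_iff_eq, decide_eq_true_eq]
        exact ⟨⟨by exact_mod_cast h2, hm0⟩, hcast.mpr h3⟩
    · simp only [List.all_eq_true, List.mem_range, Bool.or_eq_true, beq_iff_eq] at hc
      simp only [false_iff, not_and]
      intro h; exact absurd h hc
  have hrev : ∀ i, i < masque.length →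
      masque.reverse.getD i 0 = masque.getD (masque.length - 1 - i) 0 :=
    fun i hi => getD_reverse_idx masque i hi
  rw [Bool.eq_iff_iff, hAiff, hBiff]
  constructor
  · intro ⟨hKL, hall⟩
    refine ⟨fun i hi => ?_, ?_, ?_⟩
    · rw [hrev i hi]
      have := hall (masque.length - 1 - i) (by omega)
      rwa [show L - 1 - (masque.length - 1 - i) = i by omega] at this
    · exact Nat.div_eq_of_lt (hKL ▸ hup)
    · rw [hKL]; exact hlow
  · intro ⟨hall, hdiv0, hge⟩
    have hKpos : 1 ≤ masque.length := by
      by_contra h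
      have hK0 : masque.length = 0 := by omega
      rw [hK0] at hdiv0
      simp at hdiv0
      omega
    have hltK : m < 10 ^ masque.length := by
      rcases Nat.div_eq_zero_iff.mp hdiv0 with h | h
      · exact absurd h (by positivity)
      · exact h
    have hKL : masque.length = L := by
      have h1 : 10 ^ (L - 1) < 10 ^ masque.length := lt_of_le_of_lt hlow hltK
      have h2 : 10 ^ (masque.length - 1) < 10 ^ L := lt_of_le_of_lt hge hup
      have h1' : L - 1 < masque.length := (Nat.pow_lt_pow_iff_right (by norm_num)).mp h1
      have h2' : masque.length - 1 < L := (Nat.pow_lt_pow_iff_right (by norm_num)).mp h2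
      omega
    refine ⟨hKL, fun j hj => ?_⟩
    have hjK : j < masque.length := by omega
    have := hall (masque.length - 1 - j) (by omega)
    rw [hrev _ (by omega), show masque.length - 1 - (masque.length - 1 - j) = j by omega] at this
    rwa [show L - 1 - j = masque.length - 1 - j by omega]

-- ===== VERDICT (by name: the statement is the Claim_ definition above) =====
theorem verif_masque_spec : Claim_unchanged_verif_masque := by
  intro masque nombre _
  unfold Spec_verif_masque
  intro hnd
  rcases lt_trichotomy nombre 0 with hneg | rfl | hpos
  · rw [altB_neg masque nombre hneg]
    unfold verif_masque
    rw [decompose_neg nombre hneg]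
    by_cases hlen : masque.length = 1
    · have hm : ¬(masque.getD 0 0 = -1 ∨ masque.getD 0 0 = PySem.Int.mod nombre 10) :=
        fun hor => hnd ⟨hneg, hlen, hor⟩
      rw [not_or] at hm
      rw [if_neg (by simp [hlen]; omega)]
      rw [checkA_eq_all, List.length_singleton, show List.range 1 = [0] from rfl]
      simp only [List.all_cons, List.all_nil, Bool.and_true]
      rw [Bool.or_eq_false_iff]
      exact ⟨beq_eq_false_iff_ne.mpr hm.1, beq_eq_false_iff_ne.mpr hm.2⟩
    · rw [if_pos (by simp; omega)]
  · rw [altB_zero]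
    unfold verif_masque
    simp
  · obtain ⟨m, rfl⟩ := Int.eq_ofNat_of_zero_le (le_of_lt hpos)
    exact main_pos masque m (by exact_mod_cast hpos)
theorem verif_masque_changed : Claim_changed_verif_masque := by
  unfold Claim_changed_verif_masque; decide
theorem verif_masque_tight : Claim_exact_verif_masque := by
  intro masque x _ hd
  obtain ⟨hneg, hlen, hor⟩ := hd
  rw [altB_neg masque x hneg]
  unfold verif_masque
  rw [decompose_neg x hneg]
  rw [if_neg (by simp [hlen]; omega)]
  rw [checkA_eq_all, List.length_singleton, show List.range 1 = [0] from rfl]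
  simp only [List.all_cons, List.all_nil, Bool.and_true]
  have hf : (masque.getD 0 0 == -1 || masque.getD 0 0 == [PySem.Int.mod x 10].getD 0 0) = true := by
    rcases hor with h | h
    · rw [beq_iff_eq.mpr h]; rfl
    · rw [(beq_iff_eq.mpr h : (masque.getD 0 0 == [PySem.Int.mod x 10].getD 0 0) = true)]
      cases (masque.getD 0 0 == -1) <;> rfl
  rw [hf]
  simp
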